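-- pv_equiv track=rewrite | github.com/Ericsson/codechecker | analyzer/codechecker_analyzer/analyzers/clangtidy/analyzer.py | _add_asterisk_for_group
-- ===== SOURCE A (Python) =====
-- from typing import Iterable, List, Optional, Set, Tuple
--
-- def _add_asterisk_for_group(
--     subset_checkers: Iterable[str],
--     all_checkers: Set[str]
-- ) -> List[str]:
--     """
--     Since CodeChecker interprets checker name prefixes as checker groups, they
--     have to be added a '*' joker character when using them at clang-tidy
--     -checks flag. This function adds a '*' for each item in "checkers" if it's
--     a checker group, i.e. identified as a prefix for any checker name in
--     "all_checkers".
--     For example "readability-container" is a prefix of multiple checkers, so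
--     this is converted to "readability-container-*". On the other hand
--     "performance-trivially-destructible" is a full checker name, so it remains
--     as is.
--     """
--     def is_group_prefix_of(prefix: str, long: str) -> bool:
--         """
--         Returns True if a checker(-group) name is prefix of another
--         checker name. For example bugprone-string is prefix of
--         bugprone-string-constructor but not of
--         bugprone-stringview-nullptr.
--         """
--         prefix_split = prefix.split('-')
--         long_split = long.split('-')
--         return prefix_split == long_split[:len(prefix_split)]
--
--     def need_asterisk(checker: str) -> bool:
--         return any(
--             is_group_prefix_of(checker, long) and checker != long
--             for long in all_checkers)
--
--     result = []
--
--     for checker in subset_checkers: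
--         result.append(checker + ('*' if need_asterisk(checker) else ''))
--
--     return result
-- ===== SOURCE B (Python) =====
-- from typing import Iterable, List, Set
--
--
-- def _add_asterisk_for_group(
--     subset_checkers: Iterable[str],
--     all_checkers: Set[str]
-- ) -> List[str]:
--     """
--     Re-implementation: one pass over all_checkers builds the set of every
--     proper checker-group prefix (the text before each '-' of a checker
--     name); then each subset checker gets a '*' iff it is in that set.
--     """
--     prefixes = set()
--     for name in all_checkers:
--         for pos, ch in enumerate(name):
--             if ch == '-':
--                 prefixes.add(name[:pos])
--     return [c + '*' if c in prefixes else c for c in subset_checkers]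
-- ===== Notes on version B (the rewrite author's own statement) =====
-- stated objective: faster
-- what changed: Instead of re-scanning all_checkers and re-splitting every name for each subset checker, B builds once the set of all proper dash-prefixes of every checker name and then decides each subset checker by a single set-membership test.
import Mathlib
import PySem

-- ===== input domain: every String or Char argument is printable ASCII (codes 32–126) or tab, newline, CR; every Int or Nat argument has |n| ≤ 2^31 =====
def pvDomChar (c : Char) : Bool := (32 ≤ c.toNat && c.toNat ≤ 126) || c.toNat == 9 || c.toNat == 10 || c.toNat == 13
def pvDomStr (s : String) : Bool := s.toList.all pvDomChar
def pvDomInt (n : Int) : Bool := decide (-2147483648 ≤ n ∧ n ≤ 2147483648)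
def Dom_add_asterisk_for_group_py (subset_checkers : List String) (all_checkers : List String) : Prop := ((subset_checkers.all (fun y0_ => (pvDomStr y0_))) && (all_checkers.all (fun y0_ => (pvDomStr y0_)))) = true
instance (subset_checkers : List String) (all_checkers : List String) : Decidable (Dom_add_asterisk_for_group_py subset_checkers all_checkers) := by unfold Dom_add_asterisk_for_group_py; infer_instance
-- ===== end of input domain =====

-- B precomputes once the set of all proper dash-prefixes of the checker names and replaces
-- A's per-checker rescan (with repeated splitting) of all_checkers by one set-membership test.

-- ===== PORT A =====
-- prefix.split('-') / long.split('-'): sep is the non-empty literal "-", so Str.split? is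
-- always `some`; .getD [] just unwraps it.
def pvIsGroupPrefixOf (pfx long : String) : Bool :=
  let prefix_split := (PySem.Str.split? pfx "-").getD []
  let long_split := (PySem.Str.split? long "-").getD []
  prefix_split == PySem.List.slice long_split none (some (prefix_split.length : Int))

def pvNeedAsterisk (all_checkers : List String) (checker : String) : Bool :=
  all_checkers.any (fun long => pvIsGroupPrefixOf checker long && checker != long)

def add_asterisk_for_group_py (subset_checkers : List String) (all_checkers : List String) : List String :=
  subset_checkers.foldl
    (fun result checker =>
      result ++ [checker ++ (if pvNeedAsterisk all_checkers checker then "*" else "")]) []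

-- ===== PORT B =====
def pvPrefixSet (all_checkers : List String) : PySem.Set String :=
  all_checkers.foldl
    (fun prefixes name =>
      (PySem.List.enumerate name.toList).foldl
        (fun prefixes p =>
          if p.2 = '-' then prefixes.add (PySem.Str.slice name none (some p.1)) else prefixes)
        prefixes)
    (PySem.Set.ofList [])

def add_asterisk_for_group_py_alt (subset_checkers : List String) (all_checkers : List String) : List String :=
  let prefixes := pvPrefixSet all_checkers
  subset_checkers.map (fun c => if c ∈ prefixes then c ++ "*" else c)

-- ===== PRECONDITION & SPEC =====
def Spec_add_asterisk_for_group_py (subset_checkers : List String) (all_checkers : List String) (out : List String) : Prop := out = add_asterisk_for_group_py_alt subset_checkers all_checkers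
instance (subset_checkers : List String) (all_checkers : List String) (out : List String) : Decidable (Spec_add_asterisk_for_group_py subset_checkers all_checkers out) := by unfold Spec_add_asterisk_for_group_py; infer_instance

-- ===== CLAIM (what is proved, stated in full; the proofs are below) =====
def Claim_equal_add_asterisk_for_group_py : Prop := ∀ (subset_checkers : List String) (all_checkers : List String), Dom_add_asterisk_for_group_py subset_checkers all_checkers → Spec_add_asterisk_for_group_py subset_checkers all_checkers (add_asterisk_for_group_py subset_checkers all_checkers)

-- ===== LEMMAS AND PROOFS =====

-- A clean structural model of s.split('-') on char lists.
def pvConsHead (pre : List Char) : List (List Char) → List (List Char)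
  | [] => [pre]
  | h :: t => (pre ++ h) :: t

def pvMySplit : List Char → List (List Char)
  | [] => [[]]
  | c :: rest => if c = '-' then [] :: pvMySplit rest else pvConsHead [c] (pvMySplit rest)

theorem pvConsHead_ne_nil (pre : List Char) (l : List (List Char)) : pvConsHead pre l ≠ [] := by
  cases l <;> simp [pvConsHead]

theorem pvMySplit_ne_nil (s : List Char) : pvMySplit s ≠ [] := by
  cases s with
  | nil => simp [pvMySplit]
  | cons c rest =>
    by_cases hc : c = '-' <;> simp [pvMySplit, hc, pvConsHead_ne_nil]

theorem pvGo_spec (fuel : Nat) : ∀ (l cur : List Char) (acc : List (List Char)),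
    l.length < fuel →
    PySem.Chars.splitOn.go ['-'] fuel l cur acc =
      acc.reverse ++ pvConsHead cur.reverse (pvMySplit l) := by
  induction fuel with
  | zero => intro l cur acc h; omega
  | succ f ih =>
    intro l cur acc h
    cases l with
    | nil =>
      simp [PySem.Chars.splitOn.go, pvMySplit, pvConsHead]
    | cons c rest =>
      by_cases hc : c = '-'
      · subst hc
        have hpre : List.isPrefixOf ['-'] ('-' :: rest) = true := by
          simp [List.isPrefixOf]
        rw [PySem.Chars.splitOn.go]
        simp only [hpre]
        rw [if_pos trivial]
        have hdrop : List.drop ['-'].length ('-' :: rest) = rest := rfl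
        rw [hdrop]
        rw [ih rest [] (cur.reverse :: acc) (by simpa using Nat.lt_of_succ_lt_succ h)]
        simp only [pvMySplit, reduceIte]
        rcases hms : pvMySplit rest with _ | ⟨mh, mt⟩
        · exact absurd hms (pvMySplit_ne_nil rest)
        · simp [pvConsHead]
      · have hpre : List.isPrefixOf ['-'] (c :: rest) = false := by
          simp [List.isPrefixOf]
          intro hcc; exact absurd hcc.symm hc
        rw [PySem.Chars.splitOn.go]
        simp only [hpre, Bool.false_eq_true, if_false]
        rw [ih rest (c :: cur) acc (by simpa using Nat.lt_of_succ_lt_succ h)]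
        simp only [pvMySplit, if_neg hc]
        rcases hms : pvMySplit rest with _ | ⟨mh, mt⟩
        · exact absurd hms (pvMySplit_ne_nil rest)
        · simp [pvConsHead, List.reverse_cons]
  
theorem pvSplitOn_dash (s : List Char) : PySem.Chars.splitOn s ['-'] = pvMySplit s := by
  unfold PySem.Chars.splitOn
  rw [pvGo_spec (s.length + 1) s [] [] (Nat.lt_succ_self _)]
  rcases hms : pvMySplit s with _ | ⟨mh, mt⟩
  · exact absurd hms (pvMySplit_ne_nil s)
  · simp [pvConsHead]

-- join with '-' undoes pvMySplit
def pvJoinDash : List (List Char) → List Char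
  | [] => []
  | [h] => h
  | h :: t => h ++ '-' :: pvJoinDash t

theorem pvJoinDash_consHead (c : Char) (l : List (List Char)) (hl : l ≠ []) :
    pvJoinDash (pvConsHead [c] l) = c :: pvJoinDash l := by
  cases l with
  | nil => exact absurd rfl hl
  | cons h t => cases t <;> simp [pvConsHead, pvJoinDash]

theorem pvJoinDash_mySplit (s : List Char) : pvJoinDash (pvMySplit s) = s := by
  induction s with
  | nil => simp [pvMySplit, pvJoinDash]
  | cons c rest ih =>
    by_cases hc : c = '-'
    · subst hc
      simp only [pvMySplit, reduceIte]
      rcases hms : pvMySplit rest with _ | ⟨mh, mt⟩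
      · exact absurd hms (pvMySplit_ne_nil rest)
      · rw [hms] at ih; simpa [pvJoinDash] using ih
    · simp only [pvMySplit, if_neg hc]
      rw [pvJoinDash_consHead c _ (pvMySplit_ne_nil rest), ih]

theorem pvConsHead_append (pre : List Char) (xs ys : List (List Char)) (hxs : xs ≠ []) :
    pvConsHead pre (xs ++ ys) = pvConsHead pre xs ++ ys := by
  cases xs with
  | nil => exact absurd rfl hxs
  | cons h t => simp [pvConsHead]

theorem pvMySplit_append (a b : List Char) :
    pvMySplit (a ++ '-' :: b) = pvMySplit a ++ pvMySplit b := by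
  induction a with
  | nil => simp [pvMySplit]
  | cons c a' ih =>
    by_cases hc : c = '-'
    · subst hc; simp [pvMySplit, ih]
    · simp only [List.cons_append, pvMySplit, if_neg hc, ih]
      rw [pvConsHead_append _ _ _ (pvMySplit_ne_nil a')]

theorem pvJoinDash_append (pc : List (List Char)) (h : List Char) (t : List (List Char))
    (hpc : pc ≠ []) :
    pvJoinDash (pc ++ h :: t) = pvJoinDash pc ++ '-' :: pvJoinDash (h :: t) := by
  induction pc with
  | nil => exact absurd rfl hpc
  | cons p pr ih =>
    cases pr with
    | nil => simp [pvJoinDash]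
    | cons p2 pr2 =>
      have := ih (by simp)
      simp only [List.cons_append, pvJoinDash] at *
      rw [this]
      simp

-- A's per-pair condition, characterised on char lists
theorem pvAchar (c l : List Char) :
    (pvMySplit c = (pvMySplit l).take (pvMySplit c).length ∧ c ≠ l) ↔ (c ++ ['-']) <+: l := by
  constructor
  · rintro ⟨htake, hne⟩
    by_cases hlen : (pvMySplit l).length ≤ (pvMySplit c).length
    · exfalso
      rw [List.take_of_length_le hlen] at htake
      exact hne (by rw [← pvJoinDash_mySplit c, ← pvJoinDash_mySplit l, htake])
    · push_neg at hlen
      have hsplit : pvMySplit l = pvMySplit c ++ (pvMySplit l).drop (pvMySplit c).length := by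
        conv_lhs => rw [← List.take_append_drop (pvMySplit c).length (pvMySplit l)]
        rw [← htake]
      rcases hd : (pvMySplit l).drop (pvMySplit c).length with _ | ⟨h, t⟩
      · exfalso
        have := congrArg List.length hd
        simp at this
        omega
      · rw [hd] at hsplit
        have : l = c ++ '-' :: pvJoinDash (h :: t) := by
          rw [← pvJoinDash_mySplit l, hsplit,
            pvJoinDash_append _ _ _ (pvMySplit_ne_nil c), pvJoinDash_mySplit]
        exact ⟨pvJoinDash (h :: t), by simp [this]⟩
  · rintro ⟨r, hr⟩
    have hl : l = c ++ '-' :: r := by simpa using hr.symm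
    subst hl
    refine ⟨?_, ?_⟩
    · rw [pvMySplit_append, List.take_left]
    · intro hcl
      have := congrArg List.length hcl
      simp at this

theorem pvStrInj : Function.Injective (fun s : String => s.toList) :=
  fun _ _ h => String.toList_inj.1 h

theorem pvSplitGetD (s : String) :
    ((PySem.Str.split? s "-").getD []).map String.toList = pvMySplit s.toList := by
  have hmap := PySem.Str.split?_map s "-"
  have hsep : ("-" : String).toList = ['-'] := by decide
  rw [hsep] at hmap
  rcases hsp : PySem.Str.split? s "-" with _ | xs
  · rw [hsp] at hmap
    simp [PySem.Chars.split?] at hmap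
  · rw [hsp] at hmap
    simp only [Option.map_some] at hmap
    have : PySem.Chars.split? s.toList ['-'] = some (pvMySplit s.toList) := by
      simp [PySem.Chars.split?, pvSplitOn_dash]
    rw [this] at hmap
    simpa using hmap

theorem pvAstr (c l : String) :
    (pvIsGroupPrefixOf c l && (c != l)) = true ↔ (c.toList ++ ['-']) <+: l.toList := by
  rw [← pvAchar c.toList l.toList]
  unfold pvIsGroupPrefixOf
  simp only [Bool.and_eq_true, beq_iff_eq, bne_iff_ne, ne_eq]
  constructor
  · rintro ⟨heq, hne⟩
    refine ⟨?_, fun h => hne (String.toList_inj.1 h)⟩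
    have := congrArg (List.map String.toList) heq
    rw [PySem.List.slice_to _ (by positivity)] at this
    simp only [Int.toNat_natCast] at this
    rw [List.map_take] at this
    rw [pvSplitGetD, pvSplitGetD] at this
    have hlen : ((PySem.Str.split? c "-").getD []).length = (pvMySplit c.toList).length := by
      rw [← pvSplitGetD c]; simp
    rwa [hlen] at this
  · rintro ⟨heq, hne⟩
    refine ⟨?_, fun h => hne (congrArg String.toList h)⟩
    rw [PySem.List.slice_to _ (by positivity)]
    simp only [Int.toNat_natCast]
    apply List.map_injective_iff.2 pvStrInj
    rw [List.map_take, pvSplitGetD, pvSplitGetD]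
    have hlen : ((PySem.Str.split? c "-").getD []).length = (pvMySplit c.toList).length := by
      rw [← pvSplitGetD c]; simp
    rwa [hlen]

theorem pvNeed_iff (all : List String) (c : String) :
    pvNeedAsterisk all c = true ↔ ∃ l ∈ all, (c.toList ++ ['-']) <+: l.toList := by
  unfold pvNeedAsterisk
  rw [List.any_eq_true]
  constructor
  · rintro ⟨l, hl, hcond⟩; exact ⟨l, hl, (pvAstr c l).1 hcond⟩
  · rintro ⟨l, hl, hcond⟩; exact ⟨l, hl, (pvAstr c l).2 hcond⟩

-- B-side characterisation
theorem pvMemEnumerate (xs : List Char) : ∀ (i : Int) (p : Int × Char),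
    p ∈ PySem.List.enumerate xs i ↔ ∃ k : Nat, p.1 = i + k ∧ xs[k]? = some p.2 := by
  induction xs with
  | nil => intro i p; simp [PySem.List.enumerate]
  | cons x t ih =>
    intro i p
    simp only [PySem.List.enumerate, List.mem_cons, ih (i + 1)]
    constructor
    · rintro (rfl | ⟨k, hk, hget⟩)
      · exact ⟨0, by simp⟩
      · exact ⟨k + 1, by omega, by simpa using hget⟩
    · rintro ⟨k, hk, hget⟩
      cases k with
      | zero =>
        left
        simp only [List.getElem?_cons_zero, Option.some_inj] at hget
        obtain ⟨p1, p2⟩ := p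
        simp_all
      | succ k' =>
        right
        exact ⟨k', by omega, by simpa using hget⟩

theorem pvPrefixDashIff (cs xs : List Char) :
    (∃ k : Nat, xs[k]? = some '-' ∧ cs = xs.take k) ↔ (cs ++ ['-']) <+: xs := by
  constructor
  · rintro ⟨k, hget, rfl⟩
    have hk : k < xs.length := by
      by_contra h
      rw [List.getElem?_eq_none (by omega)] at hget; simp at hget
    have : xs.take (k + 1) = xs.take k ++ ['-'] := by
      rw [List.take_add_one, hget]; rfl
    rw [← this]; exact List.take_prefix _ _
  · rintro ⟨r, hr⟩
    have hxs : xs = cs ++ '-' :: r := by simpa using hr.symm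
    refine ⟨cs.length, ?_, ?_⟩
    · rw [hxs, List.getElem?_append_right (le_refl _)]
      simp
    · rw [hxs, List.take_left]

theorem pvMemInnerFold (L : List (Int × Char)) (f : Int → String) :
    ∀ (s : PySem.Set String) (c : String),
    c ∈ L.foldl (fun s p => if p.2 = '-' then s.add (f p.1) else s) s ↔
      c ∈ s ∨ ∃ p ∈ L, p.2 = '-' ∧ c = f p.1 := by
  induction L with
  | nil => intro s c; simp
  | cons q L' ih =>
    intro s c
    simp only [List.foldl_cons, List.mem_cons, ih]
    by_cases hq : q.2 = '-'
    · simp only [if_pos hq, PySem.Set.mem_add]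
      constructor
      · rintro ((h | h) | h)
        · exact Or.inl h
        · exact Or.inr ⟨q, Or.inl rfl, hq, h⟩
        · rcases h with ⟨p, hp, hd, he⟩; exact Or.inr ⟨p, Or.inr hp, hd, he⟩
      · rintro (h | ⟨p, (rfl | hp), hd, he⟩)
        · exact Or.inl (Or.inl h)
        · exact Or.inl (Or.inr he)
        · exact Or.inr ⟨p, hp, hd, he⟩
    · simp only [if_neg hq]
      constructor
      · rintro (h | ⟨p, hp, hd, he⟩)
        · exact Or.inl h
        · exact Or.inr ⟨p, Or.inr hp, hd, he⟩
      · rintro (h | ⟨p, (rfl | hp), hd, he⟩)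
        · exact Or.inl h
        · exact absurd hd hq
        · exact Or.inr ⟨p, hp, hd, he⟩

theorem pvMemInnerName (name : String) (s : PySem.Set String) (c : String) :
    c ∈ (PySem.List.enumerate name.toList).foldl
        (fun s p => if p.2 = '-' then s.add (PySem.Str.slice name none (some p.1)) else s) s ↔
      c ∈ s ∨ (c.toList ++ ['-']) <+: name.toList := by
  have H := pvMemInnerFold (PySem.List.enumerate name.toList)
    (fun i => PySem.Str.slice name none (some i)) s c
  simp only [] at H
  rw [H]
  apply or_congr Iff.rfl
  rw [← pvPrefixDashIff c.toList name.toList]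
  constructor
  · rintro ⟨p, hp, hd, he⟩
    rw [pvMemEnumerate name.toList 0 p] at hp
    obtain ⟨k, hk1, hget⟩ := hp
    refine ⟨k, by rw [← hd]; exact hget, ?_⟩
    rw [he]
    show (PySem.Str.slice name none (some p.1)).toList = name.toList.take k
    rw [PySem.Str.toList_slice, PySem.Chars.slice_eq_listSlice, hk1,
      show (0 : Int) + (k : Int) = (k : Int) by omega,
      PySem.List.slice_to _ (Int.natCast_nonneg k), Int.toNat_natCast]
  · rintro ⟨k, hget, htake⟩
    refine ⟨((k : Int), '-'), ?_, rfl, ?_⟩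
    · rw [pvMemEnumerate name.toList 0]
      exact ⟨k, by omega, hget⟩
    · apply pvStrInj
      show c.toList = (PySem.Str.slice name none (some ((k : Int), '-').1)).toList
      rw [PySem.Str.toList_slice, PySem.Chars.slice_eq_listSlice,
        PySem.List.slice_to _ (Int.natCast_nonneg k), Int.toNat_natCast]
      exact htake

theorem pvMemPrefixSet (all : List String) (c : String) :
    c ∈ pvPrefixSet all ↔ ∃ name ∈ all, (c.toList ++ ['-']) <+: name.toList := by
  unfold pvPrefixSet
  suffices h : ∀ (s : PySem.Set String),
      c ∈ all.foldl (fun prefixes name =>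
        (PySem.List.enumerate name.toList).foldl
          (fun prefixes p =>
            if p.2 = '-' then prefixes.add (PySem.Str.slice name none (some p.1)) else prefixes)
          prefixes) s ↔
      c ∈ s ∨ ∃ name ∈ all, (c.toList ++ ['-']) <+: name.toList by
    rw [h (PySem.Set.ofList [])]
    simp
  induction all with
  | nil => intro s; simp
  | cons n t ih =>
    intro s
    simp only [List.foldl_cons, List.mem_cons, ih, pvMemInnerName]
    constructor
    · rintro ((h | h) | ⟨m, hm, hp⟩)
      · exact Or.inl h
      · exact Or.inr ⟨n, Or.inl rfl, h⟩
      · exact Or.inr ⟨m, Or.inr hm, hp⟩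
    · rintro (h | ⟨m, (rfl | hm), hp⟩)
      · exact Or.inl (Or.inl h)
      · exact Or.inl (Or.inr hp)
      · exact Or.inr ⟨m, hm, hp⟩

theorem pvFoldlAppendMap (g : String → String) (l : List String) :
    ∀ acc, l.foldl (fun r x => r ++ [g x]) acc = acc ++ l.map g := by
  induction l with
  | nil => intro acc; simp
  | cons x t ih => intro acc; simp [ih]

-- ===== VERDICT (by name: the statement is the Claim_ definition above) =====
theorem add_asterisk_for_group_py_spec : Claim_equal_add_asterisk_for_group_py := by
  intro subset_checkers all_checkers _
  unfold Spec_add_asterisk_for_group_py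
  unfold add_asterisk_for_group_py add_asterisk_for_group_py_alt
  rw [pvFoldlAppendMap, List.nil_append]
  apply List.map_congr_left
  intro c _
  by_cases h : c ∈ pvPrefixSet all_checkers
  · have : pvNeedAsterisk all_checkers c = true :=
      (pvNeed_iff all_checkers c).2 ((pvMemPrefixSet all_checkers c).1 h)
    simp [h, this]
  · have : pvNeedAsterisk all_checkers c = false := by
      rw [Bool.eq_false_iff]
      intro hT
      exact h ((pvMemPrefixSet all_checkers c).2 ((pvNeed_iff all_checkers c).1 hT))
    simp [h, this, String.append_empty]
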